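-- pv_equiv track=rewrite | github.com/MTaggart97/AdventOfCode | aoc2021/day3/part2.py | filter_min
-- ===== SOURCE A (Python) =====
-- def filter_min(numbers: list, index: int):
--     if len(numbers) == 1 or index == 0:
--         return numbers
--     count = 0
--     for num in numbers:
--         count += int((num >> index-1) & 0b1)
--
--     drop_prefix = int(2*count < int(len(numbers)))
--
--     return filter_min([n for n in numbers if drop_prefix == int((n >> index-1) & 0b1)], index-1)
-- ===== SOURCE B (Python) =====
-- def filter_min(numbers: list, index: int):
--     # Iterative: each round partition into zero-bit and one-bit lists and keep the strict minority side (ties keep zeros).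
--     while len(numbers) != 1 and index != 0:
--         index -= 1
--         ones = [n for n in numbers if (n >> index) & 1]
--         zeros = [n for n in numbers if not ((n >> index) & 1)]
--         numbers = ones if len(ones) < len(zeros) else zeros
--     return numbers
-- ===== Notes on version B (the rewrite author's own statement) =====
-- stated objective: alternative
-- what changed: Replaced the tail recursion plus count-then-filter passes by a while loop that partitions each round into zero-bit and one-bit lists and keeps the strict minority side.
import Mathlib
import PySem

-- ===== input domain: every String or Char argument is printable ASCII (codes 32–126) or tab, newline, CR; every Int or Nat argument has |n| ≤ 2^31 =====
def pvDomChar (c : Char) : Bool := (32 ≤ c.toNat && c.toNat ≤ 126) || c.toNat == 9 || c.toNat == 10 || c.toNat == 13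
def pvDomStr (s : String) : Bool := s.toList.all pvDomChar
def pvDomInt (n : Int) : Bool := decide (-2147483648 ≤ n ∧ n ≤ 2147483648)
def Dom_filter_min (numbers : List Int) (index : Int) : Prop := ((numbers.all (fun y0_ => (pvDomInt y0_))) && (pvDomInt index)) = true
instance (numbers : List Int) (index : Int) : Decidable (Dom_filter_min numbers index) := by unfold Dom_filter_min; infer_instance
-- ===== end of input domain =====

-- B replaces A's tail recursion (count pass + filter pass) by a while loop that partitions
-- into zero-bit / one-bit lists and keeps the strict minority side; same cost, different decomposition.


-- ===== PORT A =====
def filter_min (numbers : List Int) (index : Int) : List Int :=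
  if numbers.length = 1 ∨ index = 0 then numbers
  else if index < 0 then numbers  -- totality guard: Python raises ValueError (negative shift) here; outside Pre_
  else
    -- count / drop_prefix from the Python are inlined at their single use sites
    filter_min (numbers.filter (fun (n : Int) =>
        (if 2 * (numbers.foldl (fun (c : Int) (num : Int) => c + PySem.Int.band (num >>> (index - 1).toNat) 1) 0)
              < (numbers.length : Int) then (1 : Int) else 0)
          = PySem.Int.band (n >>> (index - 1).toNat) 1)) (index - 1)
termination_by index.toNat
decreasing_by omega

-- ===== PORT B =====
def filter_min_alt (numbers : List Int) (index : Int) : List Int :=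
  if numbers.length ≠ 1 ∧ index ≠ 0 then
    if index < 0 then numbers  -- totality guard: Python raises ValueError (negative shift) here; outside Pre_
    else
      -- ones / zeros from the Python are inlined (i = index - 1)
      filter_min_alt
        (if (numbers.filter (fun (n : Int) => PySem.Int.band (n >>> (index - 1).toNat) 1 ≠ 0)).length
              < (numbers.filter (fun (n : Int) => ¬ (PySem.Int.band (n >>> (index - 1).toNat) 1 ≠ 0))).length
          then numbers.filter (fun (n : Int) => PySem.Int.band (n >>> (index - 1).toNat) 1 ≠ 0)
          else numbers.filter (fun (n : Int) => ¬ (PySem.Int.band (n >>> (index - 1).toNat) 1 ≠ 0)))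
        (index - 1)
  else numbers
termination_by index.toNat
decreasing_by omega

-- ===== PRECONDITION & SPEC =====
-- Pre_ excludes only inputs where A raises: index < 0 with more or fewer than one number
-- makes Python shift by a negative amount (ValueError).
def Pre_filter_min (numbers : List Int) (index : Int) : Prop := numbers.length = 1 ∨ 0 ≤ index
instance (numbers : List Int) (index : Int) : Decidable (Pre_filter_min numbers index) := by unfold Pre_filter_min; infer_instance
def pvWitness_filter_min : List Int × Int := ([4, 5, 6, 7], 3)
def Spec_filter_min (numbers : List Int) (index : Int) (out : List Int) : Prop := out = filter_min_alt numbers index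
instance (numbers : List Int) (index : Int) (out : List Int) : Decidable (Spec_filter_min numbers index out) := by unfold Spec_filter_min; infer_instance

-- ===== CLAIM (what is proved, stated in full; the proofs are below) =====
def Claim_equal_filter_min : Prop := ∀ (numbers : List Int) (index : Int), Dom_filter_min numbers index → Pre_filter_min numbers index → Spec_filter_min numbers index (filter_min numbers index)

-- ===== LEMMAS AND PROOFS =====

-- the low bit is 0 or 1
theorem band_one_cases (a : Int) : PySem.Int.band a 1 = 0 ∨ PySem.Int.band a 1 = 1 := by
  simp [PySem.Int.band]; omega

-- A's count accumulator counts the elements whose selected bit is 1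
theorem count_eq_ones_length (k : Nat) (numbers : List Int) (c : Int) :
    numbers.foldl (fun (c : Int) (num : Int) => c + PySem.Int.band (num >>> k) 1) c
      = c + ((numbers.filter (fun (n : Int) => PySem.Int.band (n >>> k) 1 ≠ 0)).length : Int) := by
  induction numbers generalizing c with
  | nil => simp
  | cons x xs ih =>
    simp only [List.foldl_cons, List.filter_cons, ih]
    rcases band_one_cases (x >>> k) with h | h <;> (simp [h]; try ring)

theorem filter_min_eq_alt (fuel : Nat) (numbers : List Int) (index : Int)
    (hf : index.toNat ≤ fuel) (hpre : numbers.length = 1 ∨ 0 ≤ index) :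
    filter_min numbers index = filter_min_alt numbers index := by
  induction fuel generalizing numbers index with
  | zero =>
    -- index.toNat = 0, so index ≤ 0; with Pre_, either len = 1 or index = 0
    have h0 : index ≤ 0 := by omega
    rw [filter_min, filter_min_alt]
    by_cases hb : numbers.length = 1 ∨ index = 0
    · simp only [hb, if_pos]
      have : ¬ (numbers.length ≠ 1 ∧ index ≠ 0) := by tauto
      simp [this]
    · -- then index < 0 and len ≠ 1, contradicting Pre_
      exfalso
      rcases hpre with h | h
      · exact hb (Or.inl h)
      · exact hb (Or.inr (by omega))
  | succ m ih =>
    rw [filter_min, filter_min_alt]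
    by_cases hb : numbers.length = 1 ∨ index = 0
    · simp only [hb, if_pos]
      have : ¬ (numbers.length ≠ 1 ∧ index ≠ 0) := by tauto
      simp [this]
    · have hlen : numbers.length ≠ 1 := by tauto
      have hidx : index ≠ 0 := by tauto
      have hpos : 0 < index := by rcases hpre with h | h; omega; omega
      have hneg : ¬ index < 0 := by omega
      have hcand : (numbers.length ≠ 1 ∧ index ≠ 0) := ⟨hlen, hidx⟩
      rw [if_neg hb, if_neg hneg, if_pos hcand, if_neg hneg]
      set k := (index - 1).toNat with hk
      set ones := numbers.filter (fun (n : Int) => PySem.Int.band (n >>> k) 1 ≠ 0) with hones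
      set zeros := numbers.filter (fun (n : Int) => ¬ (PySem.Int.band (n >>> k) 1 ≠ 0)) with hzeros
      have hcount : numbers.foldl (fun (c : Int) (num : Int) => c + PySem.Int.band (num >>> k) 1) 0
          = (ones.length : Int) := by
        rw [count_eq_ones_length]; simp [hones]
      have hsplit : ones.length + zeros.length = numbers.length := by
        have h := List.length_eq_length_filter_add (l := numbers)
          (f := fun (n : Int) => decide (PySem.Int.band (n >>> k) 1 ≠ 0))
        rw [hones, hzeros]
        simp only [ne_eq, decide_not, Bool.not_not] at h ⊢
        omega
      have hfiltered : (numbers.filter (fun (n : Int) =>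
            (if 2 * numbers.foldl (fun (c : Int) (num : Int) => c + PySem.Int.band (num >>> k) 1) 0 < (numbers.length : Int) then (1:Int) else 0)
              = PySem.Int.band (n >>> k) 1))
          = if ones.length < zeros.length then ones else zeros := by
        rw [hcount]
        by_cases hlt : 2 * (ones.length : Int) < (numbers.length : Int)
        · have : ones.length < zeros.length := by omega
          simp only [hlt, if_pos, this]
          rw [hones]
          apply List.filter_congr
          intro n _
          rcases band_one_cases (n >>> k) with h | h <;> simp [h]
        · have : ¬ ones.length < zeros.length := by omega
          simp only [hlt, this, if_false]
          rw [hzeros]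
          apply List.filter_congr
          intro n _
          rcases band_one_cases (n >>> k) with h | h <;> simp [h]
      rw [hfiltered]
      exact ih _ (index - 1) (by omega) (Or.inr (by omega))

-- ===== VERDICT (by name: the statement is the Claim_ definition above) =====
theorem filter_min_spec : Claim_equal_filter_min := by
  intro numbers index _ hpre
  unfold Spec_filter_min
  exact filter_min_eq_alt index.toNat numbers index le_rfl hpre
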